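-- pv_equiv track=rewrite | github.com/MolSSI/QCEngine | qcengine/programs/tests/standard_suite_contracts.py | contractual_mp2p5
-- ===== SOURCE A (Python) =====
-- from typing import Any, Tuple
--
-- _contractual_docstring = """
--     Parameters
--     ----------
--     qc_module
--         The program or subprogram running the job (e.g., "cfour" or "cfour-ecc").
--     driver
--         {"energy", "gradient", "hessian"}
--         The derivative level that should be expected.
--     reference
--         {"rhf", "uhf", "rohf"}
--         The SCF reference since programs often output differently based on it.
--     method
--         The target AtomicInput.model.method since "free" methods may not always be
--         output (e.g., MP2 available when target is MP2 but not when target is CCSD).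
--     corl_type
--         {"conv", "df", "cd"}
--         The algorithm for the target method since programs often output differently
--         based on it.
--     fcae
--         {"ae", "fc"}
--         The all-electron vs. frozen-orbital aspect.
--
--     Returns
--     -------
--     (rpv, pv, expected)
--         Of all the QCVariables `pv` that should be available, returns tuple of
--         whether `expected` and what key `rpv` in the reference `pv` should match.
--
-- """
--
-- def contractual_mp2p5(
--     qc_module: str, driver: str, reference: str, method: str, corl_type: str, fcae: str, sdsc: str
-- ) -> Tuple[str, str, bool]:
--     f"""Of the list of QCVariables an ideal MP2.5 should produce, returns whether or
--     not each is expected, given the calculation circumstances (like QC program).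
--
--     {_contractual_docstring}
--     """
--     contractual_qcvars = [
--         "HF TOTAL ENERGY",
--         "MP2.5 CORRELATION ENERGY",
--         "MP2.5 TOTAL ENERGY",
--         "MP2.5 SAME-SPIN CORRELATION ENERGY",
--         "MP2.5 SINGLES ENERGY",
--         "MP2.5 DOUBLES ENERGY",
--         "MP2.5 OPPOSITE-SPIN CORRELATION ENERGY",
--     ]
--     if driver == "gradient" and method == "mp2.5":
--         contractual_qcvars.append("MP2.5 TOTAL GRADIENT")
--     elif driver == "hessian" and method == "mp2.5":
--         # contractual_qcvars.append("MP2.5 TOTAL GRADIENT")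
--         contractual_qcvars.append("MP2.5 TOTAL HESSIAN")
--
--     for pv in contractual_qcvars:
--         expected = True
--         if (
--             (
--                 (qc_module.startswith("cfour") and method in ["mp3", "mp4(sdq)", "mp4"])
--                 or (
--                     qc_module == "psi4-occ"
--                     and reference == "rhf"
--                     and corl_type in ["df", "cd"]
--                     and method in ["mp2.5", "mp3", "omp2.5"]
--                 )
--                 or (qc_module.startswith("nwchem") and method in ["mp3", "mp4"])
--             )
--             and pv in ["MP2.5 SAME-SPIN CORRELATION ENERGY", "MP2.5 OPPOSITE-SPIN CORRELATION ENERGY"]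
--         ) or (
--             (
--                 (qc_module == "psi4-detci" and method in ["mp3", "mp4"])
--                 or (
--                     qc_module == "psi4-occ"
--                     and reference == "rohf"
--                     and corl_type in ["conv", "df", "cd"]
--                     and method in ["omp2.5", "omp3"]
--                 )
--             )
--             # Note SS/OS might be obtainable but no reference to verify
--             and pv
--             in [
--                 "MP2.5 CORRELATION ENERGY",
--                 "MP2.5 TOTAL ENERGY",
--                 "MP2.5 SAME-SPIN CORRELATION ENERGY",
--                 "MP2.5 OPPOSITE-SPIN CORRELATION ENERGY",
--                 "MP2.5 SINGLES ENERGY",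
--                 "MP2.5 DOUBLES ENERGY",
--             ]
--         ):
--             expected = False
--
--         yield (pv, pv, expected)
-- ===== SOURCE B (Python) =====
-- def contractual_mp2p5(qc_module, driver, reference, method, corl_type, fcae, sdsc):
--     # Each key gets a numeric rank (0 = always printed, 1 = correlation quantities,
--     # 2 = spin-component quantities); the circumstances determine a single numeric
--     # cap, and a key is expected exactly when its rank does not exceed the cap.
--     spin_off = (
--         (qc_module.startswith("cfour") and method in ("mp3", "mp4(sdq)", "mp4"))
--         or (
--             qc_module == "psi4-occ"
--             and reference == "rhf"
--             and corl_type in ("df", "cd")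
--             and method in ("mp2.5", "mp3", "omp2.5")
--         )
--         or (qc_module.startswith("nwchem") and method in ("mp3", "mp4"))
--     )
--     corl_off = (qc_module == "psi4-detci" and method in ("mp3", "mp4")) or (
--         qc_module == "psi4-occ"
--         and reference == "rohf"
--         and corl_type in ("conv", "df", "cd")
--         and method in ("omp2.5", "omp3")
--     )
--     cap = 0 if corl_off else (1 if spin_off else 2)
--     rank = {
--         "HF TOTAL ENERGY": 0,
--         "MP2.5 CORRELATION ENERGY": 1,
--         "MP2.5 TOTAL ENERGY": 1,
--         "MP2.5 SAME-SPIN CORRELATION ENERGY": 2,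
--         "MP2.5 SINGLES ENERGY": 1,
--         "MP2.5 DOUBLES ENERGY": 1,
--         "MP2.5 OPPOSITE-SPIN CORRELATION ENERGY": 2,
--     }
--     keys = list(rank)
--     if method == "mp2.5" and driver in ("gradient", "hessian"):
--         keys.append("MP2.5 TOTAL GRADIENT" if driver == "gradient" else "MP2.5 TOTAL HESSIAN")
--     for pv in keys:
--         yield (pv, pv, rank.get(pv, 0) <= cap)
-- ===== Notes on version B (the rewrite author's own statement) =====
-- stated objective: alternative
-- what changed: Replaces A's per-key boolean exclusion logic (compound condition re-evaluated and two membership-list scans per key) with a numeric severity model: each key carries a rank in a dict, the circumstances yield one integer cap, and a key is expected iff rank <= cap.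
import Mathlib
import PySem

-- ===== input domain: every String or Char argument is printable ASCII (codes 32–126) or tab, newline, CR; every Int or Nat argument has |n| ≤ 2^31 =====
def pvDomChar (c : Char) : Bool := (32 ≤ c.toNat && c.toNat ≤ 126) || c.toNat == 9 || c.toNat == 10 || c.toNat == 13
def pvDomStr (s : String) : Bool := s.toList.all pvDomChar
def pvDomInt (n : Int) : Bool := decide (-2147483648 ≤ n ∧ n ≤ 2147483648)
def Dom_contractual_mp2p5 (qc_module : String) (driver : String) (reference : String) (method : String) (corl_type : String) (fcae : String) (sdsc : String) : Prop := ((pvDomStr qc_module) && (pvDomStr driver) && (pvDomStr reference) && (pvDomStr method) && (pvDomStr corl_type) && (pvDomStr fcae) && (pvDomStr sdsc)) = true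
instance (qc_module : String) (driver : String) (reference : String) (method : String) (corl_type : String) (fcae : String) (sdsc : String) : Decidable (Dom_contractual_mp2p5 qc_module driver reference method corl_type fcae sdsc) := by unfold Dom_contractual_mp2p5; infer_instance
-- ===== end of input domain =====

-- B replaces A's per-key boolean exclusion tests with a numeric rank-vs-cap model (objective: alternative).
-- ===== PORT A =====
def contractual_mp2p5 (qc_module : String) (driver : String) (reference : String) (method : String) (corl_type : String) (fcae : String) (sdsc : String) : List (String × String × Bool) :=
  let base : List String := ["HF TOTAL ENERGY", "MP2.5 CORRELATION ENERGY", "MP2.5 TOTAL ENERGY",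
    "MP2.5 SAME-SPIN CORRELATION ENERGY", "MP2.5 SINGLES ENERGY", "MP2.5 DOUBLES ENERGY",
    "MP2.5 OPPOSITE-SPIN CORRELATION ENERGY"]
  let contractual_qcvars : List String :=
    if driver == "gradient" && method == "mp2.5" then base ++ ["MP2.5 TOTAL GRADIENT"]
    else if driver == "hessian" && method == "mp2.5" then base ++ ["MP2.5 TOTAL HESSIAN"]
    else base
  contractual_qcvars.map (fun pv =>
    let expected := true
    let expected :=
      if (((PySem.Str.startswith qc_module "cfour" && ["mp3", "mp4(sdq)", "mp4"].contains method)
            || (qc_module == "psi4-occ" && reference == "rhf" && ["df", "cd"].contains corl_type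
                && ["mp2.5", "mp3", "omp2.5"].contains method)
            || (PySem.Str.startswith qc_module "nwchem" && ["mp3", "mp4"].contains method))
          && ["MP2.5 SAME-SPIN CORRELATION ENERGY", "MP2.5 OPPOSITE-SPIN CORRELATION ENERGY"].contains pv)
         || (((qc_module == "psi4-detci" && ["mp3", "mp4"].contains method)
            || (qc_module == "psi4-occ" && reference == "rohf" && ["conv", "df", "cd"].contains corl_type
                && ["omp2.5", "omp3"].contains method))
          && ["MP2.5 CORRELATION ENERGY", "MP2.5 TOTAL ENERGY", "MP2.5 SAME-SPIN CORRELATION ENERGY",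
              "MP2.5 OPPOSITE-SPIN CORRELATION ENERGY", "MP2.5 SINGLES ENERGY", "MP2.5 DOUBLES ENERGY"].contains pv)
      then false else expected
    (pv, pv, expected))

-- ===== PORT B =====
def contractual_mp2p5_alt (qc_module : String) (driver : String) (reference : String) (method : String) (corl_type : String) (fcae : String) (sdsc : String) : List (String × String × Bool) :=
  let spin_off : Bool :=
    (PySem.Str.startswith qc_module "cfour" && ["mp3", "mp4(sdq)", "mp4"].contains method)
    || (qc_module == "psi4-occ" && reference == "rhf" && ["df", "cd"].contains corl_type
        && ["mp2.5", "mp3", "omp2.5"].contains method)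
    || (PySem.Str.startswith qc_module "nwchem" && ["mp3", "mp4"].contains method)
  let corl_off : Bool :=
    (qc_module == "psi4-detci" && ["mp3", "mp4"].contains method)
    || (qc_module == "psi4-occ" && reference == "rohf" && ["conv", "df", "cd"].contains corl_type
        && ["omp2.5", "omp3"].contains method)
  let cap : Int := if corl_off then 0 else if spin_off then 1 else 2
  let rank : PySem.Dict String Int := PySem.Dict.ofList
    [("HF TOTAL ENERGY", 0), ("MP2.5 CORRELATION ENERGY", 1), ("MP2.5 TOTAL ENERGY", 1),
     ("MP2.5 SAME-SPIN CORRELATION ENERGY", 2), ("MP2.5 SINGLES ENERGY", 1),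
     ("MP2.5 DOUBLES ENERGY", 1), ("MP2.5 OPPOSITE-SPIN CORRELATION ENERGY", 2)]
  let keys : List String := rank.keys
  let keys : List String :=
    if method == "mp2.5" && (driver == "gradient" || driver == "hessian") then
      keys ++ [if driver == "gradient" then "MP2.5 TOTAL GRADIENT" else "MP2.5 TOTAL HESSIAN"]
    else keys
  keys.map (fun pv => (pv, pv, decide (rank.getD pv 0 ≤ cap)))

-- ===== PRECONDITION & SPEC =====
def Spec_contractual_mp2p5 (qc_module : String) (driver : String) (reference : String) (method : String) (corl_type : String) (fcae : String) (sdsc : String) (out : List (String × String × Bool)) : Prop := out = contractual_mp2p5_alt qc_module driver reference method corl_type fcae sdsc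
instance (qc_module : String) (driver : String) (reference : String) (method : String) (corl_type : String) (fcae : String) (sdsc : String) (out : List (String × String × Bool)) : Decidable (Spec_contractual_mp2p5 qc_module driver reference method corl_type fcae sdsc out) := by unfold Spec_contractual_mp2p5; infer_instance

-- ===== CLAIM =====
def Claim_equal_contractual_mp2p5 : Prop := ∀ (qc_module : String) (driver : String) (reference : String) (method : String) (corl_type : String) (fcae : String) (sdsc : String), Dom_contractual_mp2p5 qc_module driver reference method corl_type fcae sdsc → Spec_contractual_mp2p5 qc_module driver reference method corl_type fcae sdsc (contractual_mp2p5 qc_module driver reference method corl_type fcae sdsc)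

-- ===== LEMMAS AND PROOFS =====

-- ===== VERDICT =====
theorem contractual_mp2p5_spec : Claim_equal_contractual_mp2p5 := by
  intro qc_module driver reference method corl_type fcae sdsc _
  unfold Spec_contractual_mp2p5 contractual_mp2p5 contractual_mp2p5_alt
  simp only []
  generalize hS : ((PySem.Str.startswith qc_module "cfour" && ["mp3", "mp4(sdq)", "mp4"].contains method) || (qc_module == "psi4-occ" && reference == "rhf" && ["df", "cd"].contains corl_type && ["mp2.5", "mp3", "omp2.5"].contains method) || (PySem.Str.startswith qc_module "nwchem" && ["mp3", "mp4"].contains method)) = S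
  generalize hC : ((qc_module == "psi4-detci" && ["mp3", "mp4"].contains method) || (qc_module == "psi4-occ" && reference == "rohf" && ["conv", "df", "cd"].contains corl_type && ["omp2.5", "omp3"].contains method)) = C
  generalize hdg : (driver == "gradient") = dg
  generalize hdh : (driver == "hessian") = dh
  generalize hm : (method == "mp2.5") = m
  cases S <;> cases C <;> cases dg <;> cases dh <;> cases m <;> rfl
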